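-- pv_equiv track=rewrite | github.com/LogKeg/Taocauhoi | app/services/crawler/tracnghiem-net-scraper.py | _detect_subject
-- ===== SOURCE A (Python) =====
-- SUBJECT_MAP = {
--     "tieng-anh": "english",
--     "ngu-van": "literature",
--     "vat-ly": "physics",
--     "vat-li": "physics",
--     "hoa-hoc": "chemistry",
--     "sinh-hoc": "biology",
--     "lich-su": "history",
--     "dia-ly": "geography",
--     "dia-li": "geography",
--     "tin-hoc": "informatics",
--     "cong-nghe": "technology",
--     "gdcd": "civic_education",
--     "giao-duc-cong-dan": "civic_education",
--     "toan": "math",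
--     "van": "literature",
--     "hoa": "chemistry",
--     "sinh": "biology",
--     "su": "history",
--     "dia": "geography",
-- }
--
-- def _detect_subject(url: str, title: str = "") -> str:
--     """Detect subject from URL or title, prioritizing longer/more specific matches."""
--     filename = url.split('/')[-1].lower() if '/' in url else url.lower()
--     title_lower = title.lower()
--
--     # Sort by slug length (longer = more specific)
--     sorted_subjects = sorted(SUBJECT_MAP.items(), key=lambda x: len(x[0]), reverse=True)
--
--     # Check filename first
--     for slug, subj in sorted_subjects:
--         if slug in filename:
--             return subj
--
--     # Check title
--     for slug, subj in sorted_subjects: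
--         if slug in title_lower:
--             return subj
--
--     # Check full URL
--     url_lower = url.lower()
--     for slug, subj in sorted_subjects:
--         if slug in url_lower:
--             return subj
--
--     return "general"
-- ===== SOURCE B (Python) =====
-- SUBJECT_MAP = {
--     "tieng-anh": "english",
--     "ngu-van": "literature",
--     "vat-ly": "physics",
--     "vat-li": "physics",
--     "hoa-hoc": "chemistry",
--     "sinh-hoc": "biology",
--     "lich-su": "history",
--     "dia-ly": "geography",
--     "dia-li": "geography",
--     "tin-hoc": "informatics",
--     "cong-nghe": "technology",
--     "gdcd": "civic_education",
--     "giao-duc-cong-dan": "civic_education",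
--     "toan": "math",
--     "van": "literature",
--     "hoa": "chemistry",
--     "sinh": "biology",
--     "su": "history",
--     "dia": "geography",
-- }
--
--
-- def _detect_subject(url: str, title: str = "") -> str:
--     """Detect subject from URL or title, prioritizing longer/more specific matches.
--
--     No sorting: for each candidate text, a single pass over SUBJECT_MAP tracks
--     the longest matching slug (strict '>' keeps the earliest-inserted slug on
--     equal lengths, matching the stable sort's tie-break).
--     """
--     filename = url.split('/')[-1].lower() if '/' in url else url.lower()
--     for text in (filename, title.lower(), url.lower()):
--         best = None
--         for slug, subj in SUBJECT_MAP.items():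
--             if slug in text and (best is None or len(slug) > len(best[0])):
--                 best = (slug, subj)
--         if best is not None:
--             return best[1]
--     return "general"
-- ===== Notes on version B (the rewrite author's own statement) =====
-- stated objective: alternative
-- what changed: Replaced 'stable-sort SUBJECT_MAP by slug length descending, then first-match scan per text' with sort-free single passes per text that track the longest matching slug (strict '>' so the earliest-inserted slug wins ties, reproducing the stable sort's tie-break).
import Mathlib
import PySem

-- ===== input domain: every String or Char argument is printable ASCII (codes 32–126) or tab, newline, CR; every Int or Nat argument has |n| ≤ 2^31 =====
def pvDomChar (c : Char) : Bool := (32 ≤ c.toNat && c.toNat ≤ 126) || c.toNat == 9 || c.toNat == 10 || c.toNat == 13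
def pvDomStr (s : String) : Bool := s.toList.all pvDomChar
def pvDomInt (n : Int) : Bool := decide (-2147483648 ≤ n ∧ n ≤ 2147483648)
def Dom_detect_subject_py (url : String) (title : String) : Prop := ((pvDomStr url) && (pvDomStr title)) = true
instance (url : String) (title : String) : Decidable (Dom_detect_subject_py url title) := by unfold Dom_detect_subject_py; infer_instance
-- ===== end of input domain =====

-- B drops A's sort: one longest-match pass over SUBJECT_MAP per candidate text (alternative algorithm, same result).

-- SUBJECT_MAP.items() in insertion order (all keys distinct), shared module constant of both ports
def pvSubjectMap : List (String × String) :=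
  [("tieng-anh", "english"), ("ngu-van", "literature"), ("vat-ly", "physics"),
   ("vat-li", "physics"), ("hoa-hoc", "chemistry"), ("sinh-hoc", "biology"),
   ("lich-su", "history"), ("dia-ly", "geography"), ("dia-li", "geography"),
   ("tin-hoc", "informatics"), ("cong-nghe", "technology"), ("gdcd", "civic_education"),
   ("giao-duc-cong-dan", "civic_education"), ("toan", "math"), ("van", "literature"),
   ("hoa", "chemistry"), ("sinh", "biology"), ("su", "history"), ("dia", "geography")]

-- shared by both ports: filename = url.split('/')[-1].lower() if '/' in url else url.lower()
-- (the .getD defaults are unreachable: split? with sep "/" is some and returns a non-empty list)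
def pvFilename (url : String) : String :=
  if PySem.Str.isIn "/" url then
    PySem.Str.lower ((PySem.List.pyGet? ((PySem.Str.split? url "/").getD []) (-1)).getD "")
  else PySem.Str.lower url

-- ===== PORT A =====
-- 'for slug, subj in pairs: if slug in t: return subj' (none = fell through the loop)
def pvScanA : List (String × String) → String → Option String
  | [], _ => none
  | (slug, subj) :: rest, t => if PySem.Str.isIn slug t then some subj else pvScanA rest t

def detect_subject_py (url : String) (title : String) : String :=
  let filename := pvFilename url
  let title_lower := PySem.Str.lower title
  let sorted_subjects := PySem.List.sorted pvSubjectMap (fun x => PySem.Str.len x.1) true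
  match pvScanA sorted_subjects filename with
  | some s => s
  | none =>
    match pvScanA sorted_subjects title_lower with
    | some s => s
    | none =>
      let url_lower := PySem.Str.lower url
      match pvScanA sorted_subjects url_lower with
      | some s => s
      | none => "general"

-- ===== PORT B =====
-- loop body of Source B: 'if slug in text and (best is None or len(slug) > len(best[0])): best = (slug, subj)'
def pvStep {α : Type} (key : α → Int) (p : α → Bool) (best : Option α) (x : α) : Option α :=
  if p x && (match best with | none => true | some b => decide (key b < key x)) then some x else best

-- 'best = None; for slug, subj in SUBJECT_MAP.items(): …' — longest match, earliest wins ties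
def pvBest (t : String) : Option (String × String) :=
  pvSubjectMap.foldl (pvStep (fun x => PySem.Str.len x.1) (fun x => PySem.Str.isIn x.1 t)) none

def detect_subject_py_alt (url : String) (title : String) : String :=
  let filename := pvFilename url
  match pvBest filename with
  | some b => b.2
  | none =>
    match pvBest (PySem.Str.lower title) with
    | some b => b.2
    | none =>
      match pvBest (PySem.Str.lower url) with
      | some b => b.2
      | none => "general"

-- ===== PRECONDITION & SPEC =====
def Spec_detect_subject_py (url : String) (title : String) (out : String) : Prop := out = detect_subject_py_alt url title
instance (url : String) (title : String) (out : String) : Decidable (Spec_detect_subject_py url title out) := by unfold Spec_detect_subject_py; infer_instance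

-- ===== CLAIM (what is proved, stated in full; the proofs are below) =====
def Claim_equal_detect_subject_py : Prop := ∀ (url : String) (title : String), Dom_detect_subject_py url title → Spec_detect_subject_py url title (detect_subject_py url title)

-- ===== LEMMAS AND PROOFS =====

-- A's scan is find? followed by the second projection
theorem pvScanA_eq_find (l : List (String × String)) (t : String) :
    pvScanA l t = (l.find? (fun x => PySem.Str.isIn x.1 t)).map (·.2) := by
  induction l with
  | nil => rfl
  | cons x rest ih =>
    obtain ⟨slug, subj⟩ := x
    simp only [pvScanA, List.find?, PySem.Str.isIn_eq]
    by_cases h : PySem.Chars.isIn slug.toList t.toList = true <;> simp [h, ih]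

-- inserting x into a descending-sorted list and taking the first match = pvStep on the old first match
theorem pvInsert_find {α : Type} (key : α → Int) (p : α → Bool) (x : α) (ys : List α)
    (hys : ys.Pairwise (fun a b => key b ≤ key a)) :
    (PySem.List.insertBy (fun a b => decide (key b < key a)) x ys).find? p
      = pvStep key p (ys.find? p) x := by
  induction ys with
  | nil =>
    simp only [PySem.List.insertBy, List.find?, pvStep]
    by_cases h : p x = true <;> simp [h]
  | cons y ys ih =>
    have hhead : ∀ b ∈ y :: ys, key b ≤ key y := by
      intro b hb
      rcases List.mem_cons.mp hb with h | h
      · exact le_of_eq (congrArg key h)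
      · exact (List.pairwise_cons.mp hys).1 b h
    simp only [PySem.List.insertBy]
    by_cases hlt : key y < key x
    · simp only [hlt, decide_true, if_true]
      by_cases hpx : p x = true
      · rw [List.find?_cons_of_pos hpx]
        simp only [pvStep, hpx, Bool.true_and]
        cases hfind : List.find? p (y :: ys) with
        | none => simp
        | some b =>
          have hb : b ∈ y :: ys := List.mem_of_find?_eq_some hfind
          have hkb : key b < key x := lt_of_le_of_lt (hhead b hb) hlt
          simp [hkb]
      · have hpx' : p x = false := by simpa using hpx
        rw [List.find?_cons_of_neg (by simp [hpx'])]
        simp [pvStep, hpx']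
    · simp only [hlt, decide_false, Bool.false_eq_true, if_false]
      simp only [List.find?]
      by_cases hpy : p y = true
      · simp only [hpy]
        simp only [pvStep]
        have : ¬ key y < key x := hlt
        simp [this]
      · simp only [Bool.not_eq_true] at hpy
        simp only [hpy]
        exact ih (List.pairwise_cons.mp hys).2

-- first match of the descending stable sort = the longest-match fold over the original order
theorem pvFind_sorted_rev {α : Type} (key : α → Int) (p : α → Bool) (l : List α) :
    (PySem.List.sorted l key true).find? p = l.foldl (pvStep key p) none := by
  induction l using List.reverseRecOn with
  | nil => rfl
  | append_singleton l x ih =>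
    have hs : PySem.List.sorted (l ++ [x]) key true
        = PySem.List.insertBy (fun a b => decide (key b < key a)) x (PySem.List.sorted l key true) := by
      rw [PySem.List.sorted_rev_eq_foldl_insertBy, PySem.List.sorted_rev_eq_foldl_insertBy,
        List.foldl_append]
      rfl
    rw [hs, List.foldl_append,
      pvInsert_find key p x _ (PySem.List.sorted_pairwise_rev l key), ih]
    rfl

-- per-text bridge: A's scan over the sorted map = B's longest-match fold
theorem pvScan_eq_best (t : String) :
    pvScanA (PySem.List.sorted pvSubjectMap (fun x => PySem.Str.len x.1) true) t
      = (pvBest t).map (·.2) := by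
  rw [pvScanA_eq_find, pvFind_sorted_rev]
  rfl

-- ===== VERDICT (by name: the statement is the Claim_ definition above) =====
theorem detect_subject_py_spec : Claim_equal_detect_subject_py := by
  intro url title _
  unfold Spec_detect_subject_py detect_subject_py detect_subject_py_alt
  simp only [pvScan_eq_best]
  cases pvBest (pvFilename url) with
  | some b => rfl
  | none =>
    cases pvBest (PySem.Str.lower title) with
    | some b => rfl
    | none =>
      cases pvBest (PySem.Str.lower url) with
      | some b => rfl
      | none => rfl
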